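-- pv_equiv track=rewrite | github.com/ZooWagon/PerF | case-study/fhs/trans-script/run_lib.py | get_stmt_from
-- ===== SOURCE A (Python) =====
-- def get_stmt_from(lines, i):
-- 	j = i
-- 	while not is_end_with_dot(lines[j]):
-- 		j += 1
-- 	stmt = ""
-- 	for k in range(i, j + 1):
-- 		stmt += del_comment(lines[k]).strip()
-- 		if k != j:
-- 			stmt += ' '
-- 	return stmt, j
--
-- def is_end_with_dot(line):
-- 	line = del_comment(line).strip()
-- 	l = len(line)
-- 	if l == 0:
-- 		return False
-- 	i = l - 1
-- 	return line[i] == '.'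
--
-- def del_comment(line):
-- 	c1 = line.find("---")
-- 	c2 = line.find("***")
-- 	if c1 * c2 == 0:  # comment at start, empty line
-- 		return ""
-- 	elif c1 == -1 and c2 == -1:  # no comment
-- 		return line
-- 	elif c1 != -1 and c2 != -1:  # both comment sign appear
-- 		return line[:min(c1,c2)]
-- 	elif c1 != -1:   # one comment
-- 		return line[:c1]
-- 	elif c2 != -1:  #  one comment
-- 		return line[:c2]
-- 	return line
-- ===== SOURCE B (Python) =====
-- def del_comment(line):
--     cuts = [p for p in (line.find("---"), line.find("***")) if p != -1]
--     return line[:min(cuts)] if cuts else line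
--
-- def get_stmt_from(lines, i):
--     j = i
--     parts = []
--     while True:
--         s = del_comment(lines[j]).strip()
--         parts.append(s)
--         if s.endswith('.'):
--             return ' '.join(parts), j
--         j += 1
-- ===== Notes on version B (the rewrite author's own statement) =====
-- stated objective: simpler
-- what changed: B fuses A's two passes (scan to find the dot-terminated line, then rescan to concatenate with conditional trailing spaces) into one while loop that collects the stripped pieces as it scans and joins them once with ' '.join, and replaces del_comment's five-way branch by 'cut at the earliest found comment marker, if any'.
import Mathlib
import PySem

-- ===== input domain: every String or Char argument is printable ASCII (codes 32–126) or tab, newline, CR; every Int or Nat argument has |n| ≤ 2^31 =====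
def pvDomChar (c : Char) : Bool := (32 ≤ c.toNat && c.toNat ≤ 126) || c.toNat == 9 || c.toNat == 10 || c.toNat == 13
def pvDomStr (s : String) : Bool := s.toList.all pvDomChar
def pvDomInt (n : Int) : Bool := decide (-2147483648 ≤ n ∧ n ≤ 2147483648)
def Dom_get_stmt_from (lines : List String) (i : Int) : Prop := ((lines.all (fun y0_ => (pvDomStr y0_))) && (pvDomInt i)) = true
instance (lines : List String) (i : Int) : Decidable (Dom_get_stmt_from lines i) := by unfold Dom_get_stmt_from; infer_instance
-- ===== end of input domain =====

-- B fuses A's two passes (find the terminating line, then re-scan to concatenate) into one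
-- while loop that collects the stripped pieces as it scans and joins them once; del_comment
-- becomes 'cut at the earliest comment marker, if any'.  Objective: simpler.

-- ===== PORT A =====
def pv_del_comment (line : String) : String :=
  let c1 := PySem.Str.find line "---"
  let c2 := PySem.Str.find line "***"
  if c1 * c2 = 0 then ""
  else if c1 = -1 ∧ c2 = -1 then line
  else if c1 ≠ -1 ∧ c2 ≠ -1 then PySem.Str.slice line none (some (min c1 c2))
  else if c1 ≠ -1 then PySem.Str.slice line none (some c1)
  else if c2 ≠ -1 then PySem.Str.slice line none (some c2)
  else line

def pv_is_end_with_dot (line : String) : Bool :=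
  let line := PySem.Str.strip (pv_del_comment line)
  let l : Int := PySem.Str.len line
  if l = 0 then false
  else match PySem.Str.pyGet? line (l - 1) with
       | some c => c == '.'
       | none => false

-- A's 'while not is_end_with_dot(lines[j]): j += 1' (fuel covers the whole scan; on
-- IndexError — pyGet? = none — or fuel exhaustion the result is junk, excluded by Pre_)
def pv_findJ (lines : List String) (j : Int) : Nat → Int
  | 0 => j
  | f + 1 =>
    match PySem.List.pyGet? lines j with
    | none => j
    | some line => if pv_is_end_with_dot line then j else pv_findJ lines (j + 1) f

def get_stmt_from (lines : List String) (i : Int) : String × Int :=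
  let j := pv_findJ lines i (((lines.length : Int) - i).toNat + 1)
  let stmt := (PySem.List.pyRange i (j + 1) 1).foldl
    (fun stmt k =>
      (stmt ++ PySem.Str.strip (pv_del_comment (PySem.List.pyGetD lines k ""))) ++
        (if k ≠ j then " " else "")) ""
  (stmt, j)

-- ===== PORT B =====
def pv_del_comment_b (line : String) : String :=
  let cuts := [PySem.Str.find line "---", PySem.Str.find line "***"].filter (fun p => p ≠ -1)
  match cuts with
  | [] => line
  | c :: cs => PySem.Str.slice line none (some (cs.foldl min c))

def pvB_loop (lines : List String) (j : Int) (parts : List String) : Nat → String × Int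
  | 0 => (PySem.Str.join " " parts, j)
  | f + 1 =>
    match PySem.List.pyGet? lines j with
    | none => (PySem.Str.join " " parts, j)
    | some line =>
      let s := PySem.Str.strip (pv_del_comment_b line)
      let parts := parts ++ [s]
      if PySem.Str.endswith s "." then (PySem.Str.join " " parts, j)
      else pvB_loop lines (j + 1) parts f

def get_stmt_from_alt (lines : List String) (i : Int) : String × Int :=
  pvB_loop lines i [] (((lines.length : Int) - i).toNat + 1)

-- ===== PRECONDITION & SPEC =====
-- Pre_ = exactly the inputs where A's scan terminates without IndexError: the start index is
-- not below -len (Python wraps negative indices) and some line at or after i ends with a dot.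
def Pre_get_stmt_from (lines : List String) (i : Int) : Prop :=
  -(lines.length : Int) ≤ i ∧
    ∃ j ∈ PySem.List.pyRange i (lines.length : Int) 1,
      pv_is_end_with_dot (PySem.List.pyGetD lines j "") = true
instance (lines : List String) (i : Int) : Decidable (Pre_get_stmt_from lines i) := by
  unfold Pre_get_stmt_from; infer_instance

def pvWitness_get_stmt_from : List String × Int := (["ax", "b."], 0)

def Spec_get_stmt_from (lines : List String) (i : Int) (out : String × Int) : Prop := out = get_stmt_from_alt lines i
instance (lines : List String) (i : Int) (out : String × Int) : Decidable (Spec_get_stmt_from lines i out) := by unfold Spec_get_stmt_from; infer_instance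

-- ===== CLAIM (what is proved, stated in full; the proofs are below) =====
def Claim_equal_get_stmt_from : Prop := ∀ (lines : List String) (i : Int), Dom_get_stmt_from lines i → Pre_get_stmt_from lines i → Spec_get_stmt_from lines i (get_stmt_from lines i)

-- ===== LEMMAS AND PROOFS =====

theorem del_comment_b_eq (line : String) : pv_del_comment_b line = pv_del_comment line := by
  have hz : ∀ (c : Int), c = 0 → PySem.Str.slice line none (some c) = "" := by
    intro c hc; subst hc; apply String.toList_inj.mp; simp [PySem.List.slice_to]
  unfold pv_del_comment_b pv_del_comment
  generalize hg1 : PySem.Str.find line "---" = c1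
  generalize hg2 : PySem.Str.find line "***" = c2
  have h1 : -1 ≤ c1 := by rw [← hg1]; simp; exact PySem.Chars.neg_one_le_find _ _
  have h2 : -1 ≤ c2 := by rw [← hg2]; simp; exact PySem.Chars.neg_one_le_find _ _
  by_cases e1 : c1 = -1 <;> by_cases e2 : c2 = -1
  · subst e1 e2; norm_num [List.filter]
  · subst e1
    by_cases z2 : c2 = 0
    · subst z2; norm_num [List.filter, hz 0 rfl]
    · simp [List.filter, e2, z2, neg_mul, one_mul, neg_eq_zero]
  · subst e2
    by_cases z1 : c1 = 0
    · subst z1; norm_num [List.filter, hz 0 rfl]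
    · simp [List.filter, e1, z1, mul_neg, mul_one, neg_eq_zero]
  · by_cases z1 : c1 = 0
    · simp [List.filter, e2, z1]
      exact hz _ (by omega)
    · by_cases z2 : c2 = 0
      · simp [List.filter, e1, z2]
        exact hz _ (by omega)
      · simp [List.filter, e1, e2, z1, z2, mul_eq_zero]

theorem dot_eq (line : String) :
    PySem.Str.endswith (PySem.Str.strip (pv_del_comment_b line)) "." = pv_is_end_with_dot line := by
  rw [del_comment_b_eq]
  unfold pv_is_end_with_dot
  generalize PySem.Str.strip (pv_del_comment line) = s
  dsimp only
  have hE : PySem.Str.endswith s "." = PySem.Chars.endswith s.toList ['.'] := by simp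
  have hL : PySem.Str.len s = (s.toList.length : Int) := by simp
  rcases List.eq_nil_or_concat s.toList with h | ⟨ds, c, h⟩
  · rw [hE, hL, h]
    rw [if_pos (by simp)]
    decide
  · rw [List.concat_eq_append] at h
    have hlen : s.toList.length = ds.length + 1 := by simp [h]
    have hget : PySem.Str.pyGet? s ((s.toList.length : Int) - 1) = some c := by
      have hP : PySem.Str.pyGet? s ((s.toList.length : Int) - 1)
          = PySem.List.pyGet? s.toList ((s.toList.length : Int) - 1) := by simp
      have hcast : ((s.toList.length : Int) - 1) = ((ds.length : Nat) : Int) := by omega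
      rw [hP, hcast, PySem.List.pyGet?_natCast, h]
      simp
    have hend : PySem.Chars.endswith s.toList ['.'] = (c == '.') := by
      rw [h]
      by_cases hc : c = '.'
      · subst hc
        have het : PySem.Chars.endswith (ds ++ ['.']) ['.'] = true := by
          rw [PySem.Chars.endswith_iff]; exact List.suffix_append ds ['.']
        rw [het]; simp
      · have hef : PySem.Chars.endswith (ds ++ [c]) ['.'] = false := by
          rw [Bool.eq_false_iff]
          intro htrue
          rw [PySem.Chars.endswith_iff] at htrue
          obtain ⟨t, ht⟩ := htrue
          have hlast := congrArg List.getLast? ht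
          simp at hlast
          exact hc hlast.symm
        rw [hef]; simp [hc]
    have hne : ¬ ((s.toList.length : Int) = 0) := by omega
    rw [hE, hend, hL, if_neg hne, hget]

-- the piece contributed by line k
def pv_piece (lines : List String) (k : Int) : String :=
  PySem.Str.strip (pv_del_comment (PySem.List.pyGetD lines k ""))

theorem findJ_ge (lines : List String) : ∀ (f : Nat) (j : Int), j ≤ pv_findJ lines j f
  | 0, j => le_refl j
  | f + 1, j => by
    unfold pv_findJ
    cases PySem.List.pyGet? lines j with
    | none => exact le_refl j
    | some line =>
      by_cases hdot : pv_is_end_with_dot line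
      · simp [hdot]
      · simp only [hdot, if_neg, Bool.false_eq_true, not_false_eq_true]
        have := findJ_ge lines f (j + 1)
        omega

theorem join_cons_ne (x : String) (xs : List String) (hxs : xs ≠ []) :
    PySem.Str.join " " (x :: xs) = x ++ " " ++ PySem.Str.join " " xs := by
  cases xs with
  | nil => exact absurd rfl hxs
  | cons b bs =>
    apply String.toList_inj.mp
    simp only [String.toList_append, PySem.Str.toList_join, List.map_cons]
    exact PySem.Chars.join_cons_cons ..

theorem loop_eq (lines : List String) :
    ∀ (f : Nat) (j : Int) (parts : List String),
      -(lines.length : Int) ≤ j →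
      (∃ k : Int, j ≤ k ∧ k < (lines.length : Int) ∧ k - j < f ∧
          pv_is_end_with_dot (PySem.List.pyGetD lines k "") = true) →
      pvB_loop lines j parts f =
        (PySem.Str.join " " (parts ++ (PySem.List.pyRange j (pv_findJ lines j f + 1) 1).map (pv_piece lines)),
         pv_findJ lines j f) := by
  intro f
  induction f with
  | zero => intro j parts _ hk; obtain ⟨k, h1, h2, h3, h4⟩ := hk; omega
  | succ f ih =>
    intro j parts hjn hk
    obtain ⟨k, hk1, hk2, hk3, hk4⟩ := hk
    have hjlt : j < (lines.length : Int) := by omega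
    obtain ⟨line0, hget⟩ : ∃ v, PySem.List.pyGet? lines j = some v := by
      cases hg : PySem.List.pyGet? lines j with
      | some v => exact ⟨v, rfl⟩
      | none => rw [PySem.List.pyGet?_eq_none_iff] at hg; exact absurd ⟨hjn, hjlt⟩ hg
    have hgetD : PySem.List.pyGetD lines j "" = line0 := by
      simp [PySem.List.pyGetD, hget]
    unfold pvB_loop pv_findJ
    rw [hget]
    simp only [dot_eq line0]
    by_cases hdot : pv_is_end_with_dot line0
    · simp only [hdot, if_pos]
      have hr : PySem.List.pyRange j (j + 1) 1 = [j] := by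
        rw [PySem.List.pyRange_one_cons (by omega)]
        simp [pysem]
      rw [hr]
      simp [pv_piece, hgetD, del_comment_b_eq]
    · simp only [hdot, Bool.false_eq_true, if_false]
      have hkj : k ≠ j := by
        intro he; rw [he, hgetD] at hk4; rw [hk4] at hdot; exact hdot rfl
      rw [ih (j + 1) (parts ++ [PySem.Str.strip (pv_del_comment_b line0)]) (by omega)
            ⟨k, by omega, hk2, by omega, hk4⟩]
      have hge : j + 1 ≤ pv_findJ lines (j + 1) f := findJ_ge lines f (j + 1)
      rw [PySem.List.pyRange_one_cons (show j < pv_findJ lines (j + 1) f + 1 by omega)]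
      simp [pv_piece, hgetD, del_comment_b_eq]

theorem fold_join (lines : List String) (j : Int) :
    ∀ (L : List Int) (acc : String), (∀ x ∈ L, x ≠ j) →
      (L ++ [j]).foldl
        (fun stmt k =>
          (stmt ++ PySem.Str.strip (pv_del_comment (PySem.List.pyGetD lines k ""))) ++
            (if k ≠ j then " " else "")) acc =
        acc ++ PySem.Str.join " " ((L ++ [j]).map (pv_piece lines)) := by
  intro L
  induction L with
  | nil =>
    intro acc _
    simp only [List.nil_append, List.foldl_cons, List.foldl_nil, List.map_cons, List.map_nil]
    have hj : ¬ (j ≠ j) := by simp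
    rw [if_neg hj]
    apply String.toList_inj.mp
    simp [pv_piece, PySem.Chars.join_singleton]
  | cons x L ihl =>
    intro acc hx
    have hxj : x ≠ j := hx x (List.mem_cons_self ..)
    simp only [List.cons_append, List.foldl_cons, List.map_cons]
    rw [if_pos hxj, ihl _ (fun y hy => hx y (List.mem_cons_of_mem _ hy))]
    rw [join_cons_ne _ _ (by simp)]
    simp only [pv_piece]
    apply String.toList_inj.mp
    simp [String.toList_append]

-- ===== VERDICT (by name: the statement is the Claim_ definition above) =====
theorem get_stmt_from_spec : Claim_equal_get_stmt_from := by
  intro lines i _ hpre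
  obtain ⟨hlo, k, hkmem, hkdot⟩ := hpre
  rw [PySem.List.mem_pyRange_one] at hkmem
  unfold Spec_get_stmt_from get_stmt_from get_stmt_from_alt
  set f := (((lines.length : Int) - i).toNat + 1) with hf
  have hfuel : k - i < (f : Int) := by omega
  rw [loop_eq lines f i [] hlo ⟨k, hkmem.1, hkmem.2, hfuel, hkdot⟩]
  set j := pv_findJ lines i f with hj
  have hij : i ≤ j := findJ_ge lines f i
  have hsplit : PySem.List.pyRange i (j + 1) 1 = PySem.List.pyRange i j 1 ++ [j] :=
    PySem.List.pyRange_one_succ_right hij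
  simp only [List.nil_append]
  rw [hsplit, fold_join lines j (PySem.List.pyRange i j 1) ""
        (fun x hx => by rw [PySem.List.mem_pyRange_one] at hx; omega)]
  simp
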